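-- pv_equiv track=rewrite | github.com/awshx/blind_people | functions.py | lenghtLetter
-- ===== SOURCE A (Python) =====
-- def lenghtLetter(word):
--   wordLength = 0
--   lenghtLetter = 17
--   letters = list(word)
--   for letter in letters:
--     if (letter == 'm' or letter == 'w'):
--       wordLength = wordLength + 10
--     if (letter.isupper()):
--       wordLength = wordLength + 10
--     wordLength = wordLength + lenghtLetter
--   return wordLength
-- ===== SOURCE B (Python) =====
-- def lenghtLetter(word):
--   letters = list(word)
--   mw = sum(1 for c in letters if c == 'm' or c == 'w')
--   ups = sum(1 for c in letters if c.isupper())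
--   return 17 * len(letters) + 10 * mw + 10 * ups
-- ===== Notes on version B (the rewrite author's own statement) =====
-- stated objective: simpler
-- what changed: Replaced the single accumulating loop with a closed-form aggregate: 17 times the length plus 10 times two independent counts (m/w letters and uppercase letters).
import Mathlib
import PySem

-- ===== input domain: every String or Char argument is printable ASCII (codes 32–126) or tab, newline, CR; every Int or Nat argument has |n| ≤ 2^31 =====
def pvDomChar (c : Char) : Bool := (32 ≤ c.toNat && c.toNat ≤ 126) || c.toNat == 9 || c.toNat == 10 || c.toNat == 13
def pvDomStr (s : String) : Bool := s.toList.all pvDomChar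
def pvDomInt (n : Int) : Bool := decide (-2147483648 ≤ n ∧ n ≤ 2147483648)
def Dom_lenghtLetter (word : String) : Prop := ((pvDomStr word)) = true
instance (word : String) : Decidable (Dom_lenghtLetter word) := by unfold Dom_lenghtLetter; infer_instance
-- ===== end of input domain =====

-- B replaces A's single accumulating loop by a closed form: 17*length + 10*(count of 'm'/'w') + 10*(count of uppercase); simpler decomposition, same cost.


-- ===== PORT A =====
-- A's loop over list(word): each letter adds 10 (if 'm'/'w'), 10 (if uppercase), then 17.
def lenghtLetter (word : String) : Int :=
  (word.toList).foldl
    (fun wordLength letter =>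
      let w1 := if letter = 'm' ∨ letter = 'w' then wordLength + 10 else wordLength
      let w2 := if PySem.Chars.isupper letter then w1 + 10 else w1
      w2 + 17)
    0

-- ===== PORT B =====
-- closed form: 17*len + 10*count('m' or 'w') + 10*count(isupper)
def lenghtLetter_alt (word : String) : Int :=
  let letters := word.toList
  let mw : Int := (letters.countP (fun c => c = 'm' || c = 'w') : Nat)
  let ups : Int := (letters.countP (fun c => PySem.Chars.isupper c) : Nat)
  17 * (letters.length : Int) + 10 * mw + 10 * ups

-- ===== PRECONDITION & SPEC =====
def Spec_lenghtLetter (word : String) (out : Int) : Prop := out = lenghtLetter_alt word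
instance (word : String) (out : Int) : Decidable (Spec_lenghtLetter word out) := by unfold Spec_lenghtLetter; infer_instance

-- ===== CLAIM (what is proved, stated in full; the proofs are below) =====
def Claim_equal_lenghtLetter : Prop := ∀ (word : String), Dom_lenghtLetter word → Spec_lenghtLetter word (lenghtLetter word)

-- ===== LEMMAS AND PROOFS =====
theorem lenghtLetter_foldl_eq (l : List Char) (acc : Int) :
    l.foldl
      (fun wordLength letter =>
        let w1 := if letter = 'm' ∨ letter = 'w' then wordLength + 10 else wordLength
        let w2 := if PySem.Chars.isupper letter then w1 + 10 else w1
        w2 + 17)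
      acc
    = acc + 17 * (l.length : Int)
        + 10 * ((l.countP (fun c => c = 'm' || c = 'w') : Nat) : Int)
        + 10 * ((l.countP (fun c => PySem.Chars.isupper c) : Nat) : Int) := by
  induction l generalizing acc with
  | nil => simp
  | cons c t ih =>
    simp only [List.foldl_cons, List.countP_cons, List.length_cons, ih]
    by_cases hmw : c = 'm' ∨ c = 'w' <;> by_cases hu : PySem.Chars.isupper c <;>
      simp [hmw, hu] <;> ring

-- ===== VERDICT (by name: the statement is the Claim_ definition above) =====
theorem lenghtLetter_spec : Claim_equal_lenghtLetter := by
  intro word _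
  show lenghtLetter word = lenghtLetter_alt word
  simp [lenghtLetter, lenghtLetter_alt, lenghtLetter_foldl_eq]
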